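-- pv_equiv track=rewrite | github.com/CrapTheCoder/Competitive-Programming | CodeChef/PYTH 3.6/FRINUM/26859600.py | remrep
-- ===== SOURCE A (Python) =====
-- def remrep(a):
--     d = {}
--
--     for i in a:
--         try: d[i] += 1
--         except: d[i] = 1
--
--     for i in d:
--         if d[i] == 1:
--             return i
--
--     return -1
-- ===== SOURCE B (Python) =====
-- def remrep(a):
--     while a:
--         x, rest = a[0], a[1:]
--         if x not in rest:
--             return x
--         a = [y for y in rest if y != x]
--     return -1
-- ===== Notes on version B (the rewrite author's own statement) =====
-- stated objective: alternative
-- what changed: Replaces the frequency-dict build-then-scan with recursive elimination: if the head does not recur in the tail it is the answer, otherwise all its occurrences are filtered out and the shrunken list is processed again; no counts are ever computed.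
import Mathlib
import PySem

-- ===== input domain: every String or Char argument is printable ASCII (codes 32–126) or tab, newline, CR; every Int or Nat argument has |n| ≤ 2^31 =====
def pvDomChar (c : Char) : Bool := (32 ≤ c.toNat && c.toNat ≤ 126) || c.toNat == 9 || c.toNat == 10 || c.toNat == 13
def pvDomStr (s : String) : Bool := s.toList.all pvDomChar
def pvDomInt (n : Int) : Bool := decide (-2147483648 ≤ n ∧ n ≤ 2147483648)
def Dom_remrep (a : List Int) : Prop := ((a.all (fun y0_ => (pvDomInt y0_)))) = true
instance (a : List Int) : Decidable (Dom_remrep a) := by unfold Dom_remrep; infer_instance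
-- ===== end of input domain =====

-- B replaces A's frequency dict (build counts, then scan the keys) by recursive
-- elimination: if the head does not recur in the tail it is returned, otherwise all
-- its occurrences are filtered out and the loop continues; objective: alternative.

-- ===== PORT A =====
-- first loop: try d[i] += 1 / except: d[i] = 1  ≡  d[i] = d.get(i, 0) + 1
-- second loop: for i in d: if d[i] == 1: return i; after the loop return -1
def remrepScanA (d : PySem.Dict Int Int) : List Int → Int
  | [] => -1
  | k :: ks => if d.getD k 0 == 1 then k else remrepScanA d ks

def remrep (a : List Int) : Int :=
  let d := a.foldl (fun d i => d.insert i (d.getD i 0 + 1)) PySem.Dict.empty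
  remrepScanA d d.keys

-- ===== PORT B =====
-- while a: x, rest = a[0], a[1:]; if x not in rest: return x; a = [y for y in rest if y != x]
-- return -1
-- [y for y in rest if y != x]
def removeAll (x : Int) (l : List Int) : List Int := l.filter (fun y => !(y == x))

lemma length_removeAll_le (x : Int) (l : List Int) : (removeAll x l).length ≤ l.length :=
  List.length_filter_le _ _

def remrep_alt (a : List Int) : Int :=
  match a with
  | [] => -1
  | x :: rest =>
    if rest.contains x then remrep_alt (removeAll x rest) else x
termination_by a.length
decreasing_by
  exact Nat.lt_succ_of_le (length_removeAll_le _ _)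

-- ===== PRECONDITION & SPEC =====
def Spec_remrep (a : List Int) (out : Int) : Prop := out = remrep_alt a
instance (a : List Int) (out : Int) : Decidable (Spec_remrep a out) := by unfold Spec_remrep; infer_instance

-- ===== CLAIM (what is proved, stated in full; the proofs are below) =====
def Claim_equal_remrep : Prop := ∀ (a : List Int), Dom_remrep a → Spec_remrep a (remrep a)

-- ===== LEMMAS AND PROOFS =====

-- A's key scan is List.find? with a default of -1.
lemma scanA_eq_find (d : PySem.Dict Int Int) (ks : List Int) :
    remrepScanA d ks = ((ks.find? (fun k => d.getD k 0 == 1)).getD (-1)) := by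
  induction ks with
  | nil => rfl
  | cons k ks ih =>
    simp only [remrepScanA, List.find?]
    cases hb : (d.getD k 0 == 1) <;> simp_all

-- removing elements that fail p does not change the first match
lemma find?_filter_superset (p q : Int → Bool) (s : List Int)
    (h : ∀ y, q y = false → p y = false) :
    (s.filter q).find? p = s.find? p := by
  induction s with
  | nil => rfl
  | cons x s ih =>
    by_cases hq : q x = true
    · simp [hq, List.find?]; split <;> simp_all
    · have hq' : q x = false := by simpa using hq
      simp [hq', List.find?, h x hq', ih]

-- the first match in set(l) (first occurrences, in order) is the first match in l
lemma find?_ofList (p : Int → Bool) (l : List Int) :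
    (PySem.Set.ofList l).find? p = l.find? p := by
  induction l with
  | nil => rfl
  | cons x l ih =>
    rw [PySem.Set.ofList_cons]
    simp only [List.find?]
    cases hp : p x with
    | true => rfl
    | false =>
      have : PySem.Set.discard (PySem.Set.ofList l) x
          = (PySem.Set.ofList l).filter (fun y => !(y == x)) := by
        simp [PySem.Set.discard]
      rw [this, find?_filter_superset p (fun y => !(y == x)) _ (by
        intro y hy
        have : y = x := by simpa using hy
        rw [this, hp]), ih]

-- first match is unchanged when the predicates agree on the list's elements
lemma find?_congr_mem (p q : Int → Bool) (l : List Int) (h : ∀ y ∈ l, p y = q y) :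
    l.find? p = l.find? q := by
  induction l with
  | nil => rfl
  | cons x l ih =>
    rw [List.find?_cons, List.find?_cons, h x List.mem_cons_self]
    cases q x
    · exact ih (fun y hy => h y (List.mem_cons_of_mem _ hy))
    · rfl

-- B's recursive elimination computes the first element of count 1 (default -1)
lemma remrep_alt_eq_find (a : List Int) :
    remrep_alt a = ((a.find? (fun i => a.count i == 1)).getD (-1)) := by
  induction a using remrep_alt.induct with
  | case1 => simp [remrep_alt]
  | case2 x rest hmem ih =>
    have hx : x ∈ rest := by simpa using hmem
    rw [remrep_alt, if_pos hmem, ih]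
    have hpx : ((x :: rest).count x == 1) = false := by
      have : 1 ≤ rest.count x := List.one_le_count_iff.mpr hx
      simp; omega
    -- find? over x::rest skips x, then the filter drops only x's, which all fail p
    rw [List.find?_cons, hpx]
    rw [
      ← find?_filter_superset (fun i => (x :: rest).count i == 1) (fun y => !(y == x)) rest
        (by intro y hy
            have hyx : y = x := by simpa using hy
            subst hyx; simpa using hpx)]
    -- on the filtered list, counting in x::rest, in rest, and in the filtered list agree
    rw [show rest.filter (fun y => !(y == x)) = removeAll x rest from rfl]
    refine congrArg (fun o => o.getD (-1)) (find?_congr_mem _ _ _ ?_)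
    intro y hy
    have hyx : y ≠ x := by
      have := List.of_mem_filter hy
      simpa using this
    have h1 : (x :: rest).count y = rest.count y := by
      simp [Ne.symm hyx]
    have h2 : (removeAll x rest).count y = rest.count y := by
      rw [removeAll, List.count_filter]
      simp [hyx]
    simp [h1, h2]
  | case3 x rest hmem =>
    have hx : x ∉ rest := by simpa using hmem
    have hpx : ((x :: rest).count x == 1) = true := by
      simp [List.count_eq_zero_of_not_mem hx]
    rw [remrep_alt, if_neg hmem, List.find?_cons, hpx]
    rfl

-- ===== VERDICT (by name: the statement is the Claim_ definition above) =====
theorem remrep_spec : Claim_equal_remrep := by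
  intro a _
  unfold Spec_remrep remrep
  rw [PySem.Dict.foldl_insert_getD_add_one_eq_counter, scanA_eq_find,
    PySem.Dict.keys_counter, find?_ofList, remrep_alt_eq_find]
  have hp : (fun k => PySem.Dict.getD (PySem.Dict.counter a) k 0 == 1)
      = (fun i => a.count i == 1) := by
    funext k
    rw [PySem.Dict.getD_counter]
    simp
  rw [hp]
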